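-- pv_equiv track=rewrite | github.com/bharathkadur/CodeSignal | Intro/22. AvoidObstacles/AvoidObstacles.py | solution
-- ===== SOURCE A (Python) =====
-- def solution(inputArray):
--     inputArray.sort()
--     jd = 1
--     o_hit = True
--     while(o_hit):
--         o_hit = False
--         jd += 1
--         for i in range(0, len(inputArray)):
--             if inputArray[i] % jd == 0:
--                 o_hit = True
--                 break
--     return jd
-- ===== SOURCE B (Python) =====
-- def solution(inputArray):
--     inputArray.sort()
--     blocked = set()
--     for v in inputArray:
--         a = abs(v)
--         if a >= 2:
--             blocked.add(a)
--         i = 2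
--         while i * i <= a:
--             if a % i == 0:
--                 blocked.add(i)
--                 blocked.add(a // i)
--             i += 1
--     jd = 2
--     while jd in blocked:
--         jd += 1
--     return jd
-- ===== Notes on version B (the rewrite author's own statement) =====
-- stated objective: alternative
-- what changed: Instead of re-scanning the whole obstacle list for every candidate jump, B precomputes once the set of all divisors >= 2 of each obstacle (trial division up to sqrt of |v|), then returns the first jd >= 2 absent from that set; B keeps A's in-place sort so the argument mutation is identical.
-- outside the precondition, e.g. on solution([0]): A does not finish within the time limit, B returns 2
import Mathlib
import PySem

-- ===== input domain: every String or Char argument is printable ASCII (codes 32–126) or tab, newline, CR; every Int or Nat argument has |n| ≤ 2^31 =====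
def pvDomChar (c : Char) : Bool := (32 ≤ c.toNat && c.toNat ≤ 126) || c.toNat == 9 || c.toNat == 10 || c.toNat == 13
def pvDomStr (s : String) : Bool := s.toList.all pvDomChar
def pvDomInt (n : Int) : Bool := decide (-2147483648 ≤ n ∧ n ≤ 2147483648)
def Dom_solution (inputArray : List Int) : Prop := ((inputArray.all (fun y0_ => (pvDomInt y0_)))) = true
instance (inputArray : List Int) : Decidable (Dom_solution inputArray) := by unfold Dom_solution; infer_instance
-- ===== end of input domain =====

-- B replaces A's repeated full scans of the obstacle list by one precomputed set of the
-- obstacles' divisors (trial division up to sqrt) plus a single increasing search; both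
-- programs sort the argument in place, so the observable mutation is identical, and the
-- equivalence proved is about the return value.

-- ===== PORT A =====

-- fuel bound shared by both loop transliterations (a totality guard only: under
-- Pre_solution the loops exit before exhausting it)
def pvFuel (arr : List Int) : Nat :=
  arr.foldl (fun m v => max m v.natAbs) 0 + 2

-- the inner 'for i in range(len): if arr[i] % jd == 0: break' of A
def pyAnyHit (arr : List Int) (jd : Int) : Bool :=
  arr.any (fun v => PySem.Int.mod v jd == 0)

-- A's while loop: increment jd, stop at the first jd hitting no obstacle
def solLoopA (arr : List Int) (jd : Int) : Nat → Int
  | 0 => jd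
  | f + 1 =>
    let jd' := jd + 1
    if pyAnyHit arr jd' then solLoopA arr jd' f else jd'

def solution (inputArray : List Int) : Int :=
  let arr := PySem.List.sorted inputArray (fun x => x) false
  solLoopA arr 1 (pvFuel arr)

-- ===== PORT B =====

-- termination fact for the trial-division loop
theorem pv_le_mul_self (i : Int) : i ≤ i * i := by
  by_cases h : i ≤ 0
  · nlinarith
  · nlinarith [not_le.mp h]

-- B's 'while i*i <= a: if a % i == 0: add i; add a//i; i += 1'
def divLoop (a i : Int) (s : PySem.Set Int) : PySem.Set Int :=
  if h : i * i ≤ a then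
    divLoop a (i + 1)
      (if PySem.Int.mod a i == 0 then
        PySem.Set.add (PySem.Set.add s i) (PySem.Int.floordiv a i)
      else s)
  else s
termination_by (a + 1 - i).toNat
decreasing_by
  have : i ≤ a := le_trans (pv_le_mul_self i) h
  omega

-- B's first loop: the set of all divisors ≥ 2 of the obstacles
def blockedOf (arr : List Int) : PySem.Set Int :=
  arr.foldl (fun s v =>
    let a : Int := |v|
    divLoop a 2 (if 2 ≤ a then PySem.Set.add s a else s)) PySem.Set.empty

-- B's final 'while jd in blocked: jd += 1'
def solLoopB (b : PySem.Set Int) (jd : Int) : Nat → Int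
  | 0 => jd
  | f + 1 => if PySem.Set.contains b jd then solLoopB b (jd + 1) f else jd

def solution_alt (inputArray : List Int) : Int :=
  let arr := PySem.List.sorted inputArray (fun x => x) false
  solLoopB (blockedOf arr) 2 (pvFuel arr)

-- ===== PRECONDITION & SPEC =====
-- Pre_ excludes lists containing 0: there A's while loop never terminates (0 % jd == 0
-- for every jd), so A returns on exactly the inputs admitted here.
def Pre_solution (inputArray : List Int) : Prop := (0 : Int) ∉ inputArray
instance (inputArray : List Int) : Decidable (Pre_solution inputArray) := by
  unfold Pre_solution; infer_instance

def pvWitness_solution : List Int := [4, -6, 7]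

def Spec_solution (inputArray : List Int) (out : Int) : Prop := out = solution_alt inputArray
instance (inputArray : List Int) (out : Int) : Decidable (Spec_solution inputArray out) := by
  unfold Spec_solution; infer_instance

-- ===== CLAIM (what is proved, stated in full; the proofs are below) =====
def Claim_equal_solution : Prop := ∀ (inputArray : List Int), Dom_solution inputArray → Pre_solution inputArray → Spec_solution inputArray (solution inputArray)

-- ===== LEMMAS AND PROOFS =====

theorem mem_divLoop (a : Int) (x : Int) : ∀ (n : Nat) (i : Int) (s : PySem.Set Int), 1 ≤ i →
    (a + 1 - i).toNat = n →
    (x ∈ divLoop a i s ↔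
      x ∈ s ∨ ∃ j : Int, i ≤ j ∧ j * j ≤ a ∧ j ∣ a ∧ (x = j ∨ x = PySem.Int.floordiv a j)) := by
  intro n
  induction n using Nat.strong_induction_on with
  | _ n IH =>
    intro i s hi hn
    rw [divLoop]
    by_cases h : i * i ≤ a
    · rw [dif_pos h]
      have hia : i ≤ a := le_trans (pv_le_mul_self i) h
      have hrec := IH (a + 1 - (i + 1)).toNat (by omega) (i + 1)
        (if PySem.Int.mod a i == 0 then
          PySem.Set.add (PySem.Set.add s i) (PySem.Int.floordiv a i) else s)
        (by omega) rfl
      rw [hrec]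
      by_cases hdvd : i ∣ a
      · have hmod : (PySem.Int.mod a i == 0) = true := by
          simp [PySem.Int.mod_eq_zero_iff_dvd, hdvd]
        rw [if_pos hmod]
        simp only [PySem.Set.mem_add]
        constructor
        · rintro ((((hx | hx) | hx)) | ⟨j, hj1, hj2, hj3, hj4⟩)
          · exact Or.inl hx
          · exact Or.inr ⟨i, le_refl i, h, hdvd, Or.inl hx⟩
          · exact Or.inr ⟨i, le_refl i, h, hdvd, Or.inr hx⟩
          · exact Or.inr ⟨j, by omega, hj2, hj3, hj4⟩
        · rintro (hx | ⟨j, hj1, hj2, hj3, hj4⟩)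
          · exact Or.inl (Or.inl (Or.inl hx))
          · rcases eq_or_lt_of_le hj1 with heq | hlt
            · rcases hj4 with hx | hx
              · exact Or.inl (Or.inl (Or.inr (heq ▸ hx)))
              · exact Or.inl (Or.inr (heq ▸ hx))
            · exact Or.inr ⟨j, by omega, hj2, hj3, hj4⟩
      · have hmod : (PySem.Int.mod a i == 0) = false := by
          simp [PySem.Int.mod_eq_zero_iff_dvd, hdvd]
        rw [if_neg (by simp [hmod])]
        constructor
        · rintro (hx | ⟨j, hj1, hj2, hj3, hj4⟩)
          · exact Or.inl hx
          · exact Or.inr ⟨j, by omega, hj2, hj3, hj4⟩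
        · rintro (hx | ⟨j, hj1, hj2, hj3, hj4⟩)
          · exact Or.inl hx
          · have : j ≠ i := by rintro rfl; exact hdvd hj3
            exact Or.inr ⟨j, by omega, hj2, hj3, hj4⟩
    · rw [dif_neg h]
      constructor
      · exact Or.inl
      · rintro (hx | ⟨j, hj1, hj2, hj3, hj4⟩)
        · exact hx
        · exfalso
          have : i * i ≤ j * j := by nlinarith
          omega

-- the sqrt-pairing fact: the enumerated divisors are exactly the divisors ≥ 2
theorem divisor_pairing (a x : Int) (ha : 0 ≤ a) :
    ((2 ≤ a ∧ x = a) ∨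
      ∃ j : Int, 2 ≤ j ∧ j * j ≤ a ∧ j ∣ a ∧ (x = j ∨ x = PySem.Int.floordiv a j)) ↔
    (2 ≤ x ∧ a ≠ 0 ∧ x ∣ a) := by
  constructor
  · rintro (⟨h2, rfl⟩ | ⟨j, hj2, hjj, hjd, hx⟩)
    · exact ⟨h2, by omega, dvd_refl x⟩
    · have hj0 : 0 < j := by omega
      have hane : a ≠ 0 := by nlinarith
      rw [PySem.Int.floordiv_eq_ediv_of_pos hj0] at hx
      obtain ⟨c, rfl⟩ := hjd
      have hc : j * c / j = c := Int.mul_ediv_cancel_left c (by omega)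
      rcases hx with rfl | rfl
      · exact ⟨hj2, hane, Dvd.intro c rfl⟩
      · rw [hc]
        have hcj : j ≤ c := by
          have := Int.le_ediv_iff_mul_le hj0 (a := j) (b := j * c)
          rw [hc] at this
          exact this.mpr hjj
        exact ⟨by omega, hane, Dvd.intro_left j rfl⟩
  · rintro ⟨hx2, hane, hxd⟩
    have ha1 : 1 ≤ a := by omega
    obtain ⟨c, rfl⟩ := hxd
    have hc1 : 1 ≤ c := by nlinarith
    by_cases hxx : x * x ≤ x * c
    · exact Or.inr ⟨x, hx2, hxx, Dvd.intro c rfl, Or.inl rfl⟩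
    · by_cases hc : c = 1
      · subst hc; exact Or.inl ⟨by omega, by omega⟩
      · have hc2 : 2 ≤ c := by omega
        have hcx : c ≤ x := by nlinarith
        refine Or.inr ⟨c, hc2, by nlinarith, Dvd.intro_left x rfl, Or.inr ?_⟩
        rw [PySem.Int.floordiv_eq_ediv_of_pos (by omega), mul_comm,
          Int.mul_ediv_cancel_left x (by omega)]

theorem mem_blockedOf (arr : List Int) (x : Int) :
    x ∈ blockedOf arr ↔ 2 ≤ x ∧ ∃ v ∈ arr, v ≠ 0 ∧ x ∣ v := by
  have step : ∀ (s : PySem.Set Int) (v : Int),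
      x ∈ divLoop |v| 2 (if 2 ≤ |v| then PySem.Set.add s |v| else s) ↔
        x ∈ s ∨ (2 ≤ x ∧ v ≠ 0 ∧ x ∣ v) := by
    intro s v
    rw [mem_divLoop |v| x _ 2 _ (by omega) rfl]
    have habs : x ∈ (if 2 ≤ |v| then PySem.Set.add s |v| else s) ↔
        x ∈ s ∨ (2 ≤ |v| ∧ x = |v|) := by
      split_ifs with h2
      · rw [PySem.Set.mem_add]; tauto
      · tauto
    rw [habs, or_assoc, divisor_pairing |v| x (abs_nonneg v)]
    simp [abs_eq_zero, dvd_abs]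
  have main : ∀ (l : List Int) (s : PySem.Set Int),
      x ∈ l.foldl (fun s v =>
        divLoop |v| 2 (if 2 ≤ |v| then PySem.Set.add s |v| else s)) s ↔
        x ∈ s ∨ (2 ≤ x ∧ ∃ v ∈ l, v ≠ 0 ∧ x ∣ v) := by
    intro l
    induction l with
    | nil => simp
    | cons v t ih =>
      intro s
      rw [List.foldl_cons, ih, step]
      constructor
      · rintro ((hx | ⟨h1, h2, h3⟩) | ⟨h1, w, hw, h2, h3⟩)
        · exact Or.inl hx
        · exact Or.inr ⟨h1, v, List.mem_cons_self, h2, h3⟩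
        · exact Or.inr ⟨h1, w, List.mem_cons_of_mem v hw, h2, h3⟩
      · rintro (hx | ⟨h1, w, hw, h2, h3⟩)
        · exact Or.inl (Or.inl hx)
        · rcases List.mem_cons.mp hw with rfl | hw
          · exact Or.inl (Or.inr ⟨h1, h2, h3⟩)
          · exact Or.inr ⟨h1, w, hw, h2, h3⟩
  rw [blockedOf]
  rw [main arr PySem.Set.empty]
  simp [PySem.Set.empty]

theorem anyHit_iff (arr : List Int) (jd : Int) (hjd : 1 ≤ jd) :
    pyAnyHit arr jd = true ↔ ∃ v ∈ arr, jd ∣ v := by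
  simp [pyAnyHit, List.any_eq_true, PySem.Int.mod_eq_zero_iff_dvd]

theorem loops_eq (b : PySem.Set Int) (arr : List Int)
    (hpred : ∀ j : Int, 2 ≤ j → PySem.Set.contains b j = pyAnyHit arr j) :
    ∀ (fuel : Nat) (jd : Int), 1 ≤ jd →
      (∃ n : Nat, n < fuel ∧ pyAnyHit arr (jd + 1 + n) = false) →
      solLoopA arr jd fuel = solLoopB b (jd + 1) fuel := by
  intro fuel
  induction fuel with
  | zero => rintro jd _ ⟨n, hn, -⟩; omega
  | succ f ih =>
    rintro jd hjd ⟨n, hn, hmiss⟩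
    rw [solLoopA, solLoopB]
    have hc : PySem.Set.contains b (jd + 1) = pyAnyHit arr (jd + 1) := hpred _ (by omega)
    by_cases hhit : pyAnyHit arr (jd + 1) = true
    · rw [hhit] at hc
      rw [hhit, hc, if_pos rfl, if_pos rfl]
      have hne : n ≠ 0 := by
        rintro rfl
        rw [show jd + 1 + (0 : Nat) = jd + 1 by push_cast; ring] at hmiss
        rw [hmiss] at hhit; cases hhit
      exact ih (jd + 1) (by omega)
        ⟨n - 1, by omega, by
          rw [show jd + 1 + 1 + ((n - 1 : Nat) : Int) = jd + 1 + (n : Int) by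
            push_cast [Nat.cast_sub (by omega : 1 ≤ n)]; ring]
          exact hmiss⟩
    · have hhit' : pyAnyHit arr (jd + 1) = false := by
        cases hp : pyAnyHit arr (jd + 1) <;> simp_all
      rw [hhit'] at hc
      rw [hhit', hc]
      rfl

theorem foldl_max_acc_le (l : List Int) : ∀ acc : Nat, acc ≤ l.foldl (fun m v => max m v.natAbs) acc := by
  induction l with
  | nil => intro acc; exact le_refl _
  | cons w t ih => intro acc; exact le_trans (le_max_left _ _) (ih _)

theorem max_bound (arr : List Int) (v : Int) (hv : v ∈ arr) :
    v.natAbs ≤ arr.foldl (fun m v => max m v.natAbs) 0 := by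
  have gen : ∀ (l : List Int), v ∈ l → ∀ acc : Nat,
      v.natAbs ≤ l.foldl (fun m v => max m v.natAbs) acc := by
    intro l
    induction l with
    | nil => intro h; cases h
    | cons w t ih =>
      intro h acc
      rcases List.mem_cons.mp h with rfl | h
      · rw [List.foldl_cons]
        exact le_trans (le_max_right acc v.natAbs) (foldl_max_acc_le t _)
      · rw [List.foldl_cons]
        exact ih h _
  exact gen arr hv 0

-- ===== VERDICT (by name: the statement is the Claim_ definition above) =====
theorem solution_spec : Claim_equal_solution := by
  intro inputArray hdom hpre
  unfold Spec_solution solution solution_alt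
  set arr := PySem.List.sorted inputArray (fun x => x) false with harr
  have hpre' : (0 : Int) ∉ arr := by
    rw [harr]
    simp only [PySem.List.mem_sorted]
    exact hpre
  have hpred : ∀ j : Int, 2 ≤ j → PySem.Set.contains (blockedOf arr) j = pyAnyHit arr j := by
    intro j hj
    have h1 : PySem.Set.contains (blockedOf arr) j = true ↔ pyAnyHit arr j = true := by
      rw [PySem.Set.contains_iff, mem_blockedOf, anyHit_iff arr j (by omega)]
      constructor
      · rintro ⟨-, v, hv, -, hd⟩; exact ⟨v, hv, hd⟩
      · rintro ⟨v, hv, hd⟩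
        refine ⟨hj, v, hv, ?_, hd⟩
        rintro rfl; exact hpre' hv
    cases hA : pyAnyHit arr j <;> cases hB : PySem.Set.contains (blockedOf arr) j <;> simp_all
  have hmiss : pyAnyHit arr ((1 : Int) + 1 + ((arr.foldl (fun m v => max m v.natAbs) 0 : Nat) : Int)) = false := by
    set M := arr.foldl (fun m v => max m v.natAbs) 0 with hM
    cases hp : pyAnyHit arr (1 + 1 + (M : Int)) with
    | false => rfl
    | true =>
      exfalso
      obtain ⟨v, hv, hd⟩ := (anyHit_iff arr _ (by push_cast; omega)).mp hp
      have hv0 : v ≠ 0 := by rintro rfl; exact hpre' hv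
      have hle : (1 + 1 + (M : Int)) ≤ |v| := Int.le_of_dvd (abs_pos.mpr hv0) ((dvd_abs _ _).mpr hd)
      have hb := max_bound arr v hv
      rw [← hM] at hb
      rw [Int.abs_eq_natAbs] at hle
      omega
  have := loops_eq (blockedOf arr) arr hpred (pvFuel arr) 1 (le_refl 1)
    ⟨arr.foldl (fun m v => max m v.natAbs) 0, by unfold pvFuel; omega, hmiss⟩
  rw [show (1 : Int) + 1 = 2 by norm_num] at this
  exact this
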